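-- pv_equiv track=rewrite | github.com/superfast852/Project-L | extensions/NavStack_Normed.py | restitch
-- ===== SOURCE A (Python) =====
-- def restitch(path):
--     out = path
--     while True:
--         last = out[0][1]  # Get first segment
--         for i in range(1, len(out)):  # For every segment
--             segment = out[i]  # get the segment
--             if last != segment[0]:  # If the last point of the last segment is not the first point of this segment
--                 a, b = out[:i], out[i:]
--                 out = a + [[a[-1][1], b[0][0]]] + b  # Make a bridge between both segments
--                 break  # Try the continuity check again
--             last = segment[1]  # If not, move on to the next segment
--         else:
--             return out  # If the continuity check passes, return the path
-- ===== SOURCE B (Python) =====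
-- def restitch(path):
--     out = [path[0]]
--     last = path[0][1]
--     for seg in path[1:]:
--         if last != seg[0]:
--             out.append([last, seg[0]])
--         out.append(seg)
--         last = seg[1]
--     return out
-- ===== Notes on version B (the rewrite author's own statement) =====
-- stated objective: faster
-- what changed: single forward pass that inserts each bridge as it scans, instead of restarting the whole continuity scan from the start of the list after every insertion
import Mathlib
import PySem

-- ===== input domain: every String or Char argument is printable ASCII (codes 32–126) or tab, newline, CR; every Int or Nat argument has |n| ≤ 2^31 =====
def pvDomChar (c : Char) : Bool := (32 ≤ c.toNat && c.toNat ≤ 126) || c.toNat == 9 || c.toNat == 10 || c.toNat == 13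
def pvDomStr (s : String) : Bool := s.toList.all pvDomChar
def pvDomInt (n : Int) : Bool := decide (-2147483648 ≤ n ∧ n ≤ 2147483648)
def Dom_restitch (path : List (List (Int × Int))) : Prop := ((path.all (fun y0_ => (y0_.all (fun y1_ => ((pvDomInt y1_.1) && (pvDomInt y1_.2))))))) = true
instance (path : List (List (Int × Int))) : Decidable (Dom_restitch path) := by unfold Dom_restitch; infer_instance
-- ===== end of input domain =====

-- B replaces A's restart-after-every-insertion rescans by a single forward pass that
-- inserts each bridge as it scans (objective: faster, measured).

-- s[j] for a literal index j ∈ {0,1}; exact whenever j < len(s), which Pre_ guarantees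
def segGet (s : List (Int × Int)) (j : Nat) : Int × Int := s.getD j (0, 0)

-- ===== PORT A =====
-- the inner `for i in range(1, len(out))` loop: state = (last, i); returns the break index (some i) or none
def scanA : (Int × Int) → List (List (Int × Int)) → Nat → Option Nat
  | _, [], _ => none
  | last, seg :: rest, i =>
    if last ≠ segGet seg 0 then some i
    else scanA (segGet seg 1) rest (i + 1)

-- the `while True` loop, with fuel (fuel = number of segments suffices: each insertion removes
-- one discontinuity and there are fewer discontinuities than segments; proved below).
-- out[:i]/out[i:] → take/drop (exact for 0 ≤ i ≤ len); a[-1] → getLastD (a nonempty since i ≥ 1)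
def loopA : Nat → List (List (Int × Int)) → List (List (Int × Int))
  | 0, out => out
  | fuel + 1, out =>
    match scanA (segGet (out.getD 0 []) 1) (out.drop 1) 1 with
    | none => out
    | some i =>
      let a := out.take i
      let b := out.drop i
      loopA fuel (a ++ [[segGet (a.getLastD []) 1, segGet (b.getD 0 []) 0]] ++ b)

def restitch (path : List (List (Int × Int))) : List (List (Int × Int)) :=
  loopA path.length path

-- ===== PORT B =====
-- B's single `for seg in path[1:]` pass; state = (last, accumulated out), built front-to-back
def bridgeB : (Int × Int) → List (List (Int × Int)) → List (List (Int × Int))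
  | _, [] => []
  | last, seg :: rest =>
    (if last ≠ segGet seg 0 then [[last, segGet seg 0], seg] else [seg]) ++ bridgeB (segGet seg 1) rest

def restitch_alt (path : List (List (Int × Int))) : List (List (Int × Int)) :=
  match path with
  | [] => []
  | s :: rest => s :: bridgeB (segGet s 1) rest

-- ===== PRECONDITION & SPEC =====
-- excludes exactly the inputs on which A raises IndexError: the empty path (out[0])
-- and paths containing a segment with fewer than two points (segment[0]/segment[1])
def Pre_restitch (path : List (List (Int × Int))) : Prop :=
  path ≠ [] ∧ ∀ s ∈ path, 2 ≤ s.length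
instance (path : List (List (Int × Int))) : Decidable (Pre_restitch path) := by
  unfold Pre_restitch; infer_instance

def pvWitness_restitch : (List (List (Int × Int))) :=
  [[(0, 0), (1, 1)], [(2, 2), (3, 3)]]

def Spec_restitch (path : List (List (Int × Int))) (out : List (List (Int × Int))) : Prop := out = restitch_alt path
instance (path : List (List (Int × Int))) (out : List (List (Int × Int))) : Decidable (Spec_restitch path out) := by unfold Spec_restitch; infer_instance

-- ===== CLAIM (what is proved, stated in full; the proofs are below) =====
def Claim_equal_restitch : Prop := ∀ (path : List (List (Int × Int))), Dom_restitch path → Pre_restitch path → Spec_restitch path (restitch path)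

-- ===== LEMMAS AND PROOFS =====

-- the point `last` holds after scanning a prefix without finding a discontinuity
def lastVal : (Int × Int) → List (List (Int × Int)) → (Int × Int)
  | l, [] => l
  | _, seg :: rest => lastVal (segGet seg 1) rest

-- no discontinuity along the list starting from `l`
def noMis : (Int × Int) → List (List (Int × Int)) → Prop
  | _, [] => True
  | l, seg :: rest => l = segGet seg 0 ∧ noMis (segGet seg 1) rest

-- number of discontinuities (the termination measure of A's while-loop)
def dscount : (Int × Int) → List (List (Int × Int)) → Nat
  | _, [] => 0
  | l, seg :: rest => (if l ≠ segGet seg 0 then 1 else 0) + dscount (segGet seg 1) rest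

lemma dscount_le_length (l : Int × Int) (xs : List (List (Int × Int))) :
    dscount l xs ≤ xs.length := by
  induction xs generalizing l with
  | nil => simp [dscount]
  | cons s r ih =>
    simp only [dscount, List.length_cons]
    have := ih (segGet s 1)
    split <;> omega

lemma noMis_of_dscount_zero (l : Int × Int) (xs : List (List (Int × Int)))
    (h : dscount l xs = 0) : noMis l xs := by
  induction xs generalizing l with
  | nil => trivial
  | cons s r ih =>
    simp only [dscount] at h
    split at h
    · omega
    · next hn => exact ⟨not_ne_iff.mp hn, ih _ (by omega)⟩

lemma bridgeB_noMis (l : Int × Int) (xs : List (List (Int × Int)))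
    (h : noMis l xs) : bridgeB l xs = xs := by
  induction xs generalizing l with
  | nil => rfl
  | cons s r ih =>
    obtain ⟨h1, h2⟩ := h
    simp [bridgeB, h1, ih _ h2]

lemma bridgeB_append_noMis (pre : List (List (Int × Int))) (l : Int × Int)
    (ys : List (List (Int × Int))) (h : noMis l pre) :
    bridgeB l (pre ++ ys) = pre ++ bridgeB (lastVal l pre) ys := by
  induction pre generalizing l with
  | nil => rfl
  | cons s r ih =>
    obtain ⟨h1, h2⟩ := h
    simp [bridgeB, h1, lastVal, ih _ h2]

lemma dscount_append_noMis (pre : List (List (Int × Int))) (l : Int × Int)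
    (ys : List (List (Int × Int))) (h : noMis l pre) :
    dscount l (pre ++ ys) = dscount (lastVal l pre) ys := by
  induction pre generalizing l with
  | nil => rfl
  | cons s r ih =>
    obtain ⟨h1, h2⟩ := h
    simp [dscount, h1, lastVal, ih _ h2]

lemma getLastD_segGet (pre : List (List (Int × Int))) (s : List (Int × Int)) :
    segGet ((s :: pre).getLastD []) 1 = lastVal (segGet s 1) pre := by
  induction pre generalizing s with
  | nil => rfl
  | cons p r ih => simpa [lastVal] using ih p

lemma scanA_none (l : Int × Int) (xs : List (List (Int × Int))) (i : Nat)
    (h : scanA l xs i = none) : noMis l xs := by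
  induction xs generalizing l i with
  | nil => trivial
  | cons s r ih =>
    simp only [scanA] at h
    split at h
    · exact absurd h (by simp)
    · next hn => exact ⟨not_ne_iff.mp hn, ih _ _ h⟩

lemma scanA_some (xs : List (List (Int × Int))) (l : Int × Int) (i j : Nat)
    (h : scanA l xs i = some j) :
    ∃ pre seg post, xs = pre ++ seg :: post ∧ pre.length + i = j ∧
      noMis l pre ∧ lastVal l pre ≠ segGet seg 0 := by
  induction xs generalizing l i with
  | nil => simp [scanA] at h
  | cons s r ih =>
    simp only [scanA] at h
    split at h
    · next hne =>
      have hij := Option.some.inj h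
      exact ⟨[], s, r, rfl, by simpa using hij, trivial, hne⟩
    · next heq =>
      rw [not_not] at heq
      obtain ⟨pre, seg, post, hx, hlen, hnm, hne⟩ := ih _ _ h
      exact ⟨s :: pre, seg, post, by simp [hx], by simp; omega, ⟨heq, hnm⟩, hne⟩

lemma loopA_eq (fuel : Nat) (s : List (Int × Int)) (rest : List (List (Int × Int)))
    (hf : dscount (segGet s 1) rest ≤ fuel) :
    loopA fuel (s :: rest) = s :: bridgeB (segGet s 1) rest := by
  induction fuel generalizing rest with
  | zero =>
    have := noMis_of_dscount_zero (segGet s 1) rest (by omega)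
    simp [loopA, bridgeB_noMis _ _ this]
  | succ fuel ih =>
    simp only [loopA, List.getD_cons_zero, List.drop_one, List.tail_cons]
    cases hscan : scanA (segGet s 1) rest 1 with
    | none =>
      simp [bridgeB_noMis _ _ (scanA_none _ _ _ hscan)]
    | some j =>
      obtain ⟨pre, seg, post, hx, hlen, hnm, hne⟩ := scanA_some _ _ _ _ hscan
      simp only
      set L := lastVal (segGet s 1) pre with hL
      have htake : (s :: rest).take j = s :: pre := by
        subst hx
        have : j = pre.length + 1 := by omega
        simp [this]
      have hdrop : (s :: rest).drop j = seg :: post := by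
        subst hx
        have : j = pre.length + 1 := by omega
        simp [this]
      rw [htake, hdrop]
      simp only [List.getD_cons_zero, getLastD_segGet]
      have hnew : s :: pre ++ [[L, segGet seg 0]] ++ seg :: post
          = s :: (pre ++ [L, segGet seg 0] :: seg :: post) := by simp
      rw [hnew]
      have hd : dscount (segGet s 1) (pre ++ [L, segGet seg 0] :: seg :: post)
          = dscount (segGet seg 1) post := by
        rw [dscount_append_noMis _ _ _ hnm, ← hL]
        simp [dscount, segGet]
      have hd0 : dscount (segGet s 1) rest = 1 + dscount (segGet seg 1) post := by
        rw [hx, dscount_append_noMis _ _ _ hnm, ← hL]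
        simp [dscount, hne]
      rw [ih _ (by omega)]
      congr 1
      rw [hx, bridgeB_append_noMis _ _ _ hnm, bridgeB_append_noMis _ _ _ hnm, ← hL]
      have hne' : ¬ L = seg[0]?.getD (0, 0) := by simpa [segGet, List.getD] using hne
      simp [bridgeB, segGet, if_neg hne']

-- ===== VERDICT (by name: the statement is the Claim_ definition above) =====
theorem restitch_spec : Claim_equal_restitch := by
  intro path _ _
  unfold Spec_restitch restitch restitch_alt
  cases path with
  | nil => rfl
  | cons s rest =>
    exact loopA_eq _ _ _ (le_trans (dscount_le_length _ _) (by simp))
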